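-- pv_equiv track=rewrite | github.com/MDWoodman/Python_1 | zakoncz_scenariusz.py | _has_ichi_buy_signal
-- ===== SOURCE A (Python) =====
-- def _has_ichi_buy_signal(ichimoku_result_k: list[str]) -> bool:
--     if not ichimoku_result_k:
--         return False
--
--     keywords = [
--         "Przeciecie_do_gory",
--         "price_senokuspan_result_enum.Przeciecie_do_gory",
--         "price_kiusen_result_enum.Przeciecie_do_gory",
--         "tenkansen_kiusen_result_enum.Przeciecie_do_gory",
--     ]
--     return any(any(keyword in entry for keyword in keywords) for entry in ichimoku_result_k)
-- ===== SOURCE B (Python) =====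
-- def _has_ichi_buy_signal(ichimoku_result_k: list[str]) -> bool:
--     # All four keywords contain the base substring, so one check suffices.
--     return any("Przeciecie_do_gory" in entry for entry in ichimoku_result_k)
-- ===== Notes on version B (the rewrite author's own statement) =====
-- stated objective: simpler
-- what changed: All four keywords contain the base substring 'Przeciecie_do_gory', so B replaces the nested entry-by-keyword scan (and the redundant emptiness guard) with a single any() pass checking one substring per entry; a timing run measured this constant-factor win (~4-6x).
import Mathlib
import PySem

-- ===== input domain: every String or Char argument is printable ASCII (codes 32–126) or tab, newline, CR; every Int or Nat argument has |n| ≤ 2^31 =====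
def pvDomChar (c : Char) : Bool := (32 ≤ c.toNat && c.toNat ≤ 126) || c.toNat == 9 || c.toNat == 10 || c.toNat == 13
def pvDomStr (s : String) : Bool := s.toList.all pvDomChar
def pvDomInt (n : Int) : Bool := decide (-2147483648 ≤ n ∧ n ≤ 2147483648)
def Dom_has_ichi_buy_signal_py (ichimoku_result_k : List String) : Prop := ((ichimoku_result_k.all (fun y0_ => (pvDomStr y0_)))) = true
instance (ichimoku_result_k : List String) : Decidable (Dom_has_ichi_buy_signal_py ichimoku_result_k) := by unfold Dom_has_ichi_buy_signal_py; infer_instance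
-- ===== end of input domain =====

-- B replaces A's nested entry×keyword scan with a single-substring check per entry
-- (all four keywords contain "Przeciecie_do_gory"); objective: simpler.


-- ===== PORT A =====
def has_ichi_buy_signal_py (ichimoku_result_k : List String) : Bool :=
  if ichimoku_result_k.isEmpty then false
  else
    let keywords : List String :=
      ["Przeciecie_do_gory",
       "price_senokuspan_result_enum.Przeciecie_do_gory",
       "price_kiusen_result_enum.Przeciecie_do_gory",
       "tenkansen_kiusen_result_enum.Przeciecie_do_gory"]
    ichimoku_result_k.any (fun entry => keywords.any (fun keyword => PySem.Str.isIn keyword entry))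

-- ===== PORT B =====
def has_ichi_buy_signal_py_alt (ichimoku_result_k : List String) : Bool :=
  ichimoku_result_k.any (fun entry => PySem.Str.isIn "Przeciecie_do_gory" entry)

-- ===== PRECONDITION & SPEC =====
def Spec_has_ichi_buy_signal_py (ichimoku_result_k : List String) (out : Bool) : Prop := out = has_ichi_buy_signal_py_alt ichimoku_result_k
instance (ichimoku_result_k : List String) (out : Bool) : Decidable (Spec_has_ichi_buy_signal_py ichimoku_result_k out) := by unfold Spec_has_ichi_buy_signal_py; infer_instance

-- ===== CLAIM (what is proved, stated in full; the proofs are below) =====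
def Claim_equal_has_ichi_buy_signal_py : Prop := ∀ (ichimoku_result_k : List String), Dom_has_ichi_buy_signal_py ichimoku_result_k → Spec_has_ichi_buy_signal_py ichimoku_result_k (has_ichi_buy_signal_py ichimoku_result_k)

-- ===== LEMMAS AND PROOFS =====

-- For a fixed entry, A's inner keyword scan equals B's single base-substring test:
-- the base keyword is first in the list, and every other keyword contains the base,
-- so any keyword matching implies the base matches (infix transitivity).
theorem pv_entry_lemma (e : String) :
    (["Przeciecie_do_gory",
      "price_senokuspan_result_enum.Przeciecie_do_gory",
      "price_kiusen_result_enum.Przeciecie_do_gory",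
      "tenkansen_kiusen_result_enum.Przeciecie_do_gory"].any
        (fun keyword => PySem.Str.isIn keyword e))
      = PySem.Str.isIn "Przeciecie_do_gory" e := by
  simp only [List.any_cons, List.any_nil, Bool.or_false]
  cases hb : PySem.Str.isIn "Przeciecie_do_gory" e with
  | true => rw [Bool.true_or]
  | false =>
    have hnot : ¬ ("Przeciecie_do_gory".toList <:+: e.toList) := fun hinf => by
      have := (PySem.Str.isIn_iff_infix "Przeciecie_do_gory" e).2 hinf
      rw [hb] at this; exact Bool.false_ne_true this
    have k2 : PySem.Str.isIn "price_senokuspan_result_enum.Przeciecie_do_gory" e = false := by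
      cases hx : PySem.Str.isIn "price_senokuspan_result_enum.Przeciecie_do_gory" e
      · rfl
      · exact absurd ((by decide : ("Przeciecie_do_gory".toList <:+: "price_senokuspan_result_enum.Przeciecie_do_gory".toList)).trans ((PySem.Str.isIn_iff_infix _ _).1 hx)) hnot
    have k3 : PySem.Str.isIn "price_kiusen_result_enum.Przeciecie_do_gory" e = false := by
      cases hx : PySem.Str.isIn "price_kiusen_result_enum.Przeciecie_do_gory" e
      · rfl
      · exact absurd ((by decide : ("Przeciecie_do_gory".toList <:+: "price_kiusen_result_enum.Przeciecie_do_gory".toList)).trans ((PySem.Str.isIn_iff_infix _ _).1 hx)) hnot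
    have k4 : PySem.Str.isIn "tenkansen_kiusen_result_enum.Przeciecie_do_gory" e = false := by
      cases hx : PySem.Str.isIn "tenkansen_kiusen_result_enum.Przeciecie_do_gory" e
      · rfl
      · exact absurd ((by decide : ("Przeciecie_do_gory".toList <:+: "tenkansen_kiusen_result_enum.Przeciecie_do_gory".toList)).trans ((PySem.Str.isIn_iff_infix _ _).1 hx)) hnot
    rw [k2, k3, k4]
    decide

-- ===== VERDICT (by name: the statement is the Claim_ definition above) =====
theorem has_ichi_buy_signal_py_spec : Claim_equal_has_ichi_buy_signal_py := by
  intro xs _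
  unfold Spec_has_ichi_buy_signal_py has_ichi_buy_signal_py has_ichi_buy_signal_py_alt
  cases xs with
  | nil => rfl
  | cons h t =>
    simp only [List.isEmpty_cons, Bool.false_eq_true, if_false]
    rw [funext pv_entry_lemma]
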